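-- pv_equiv track=rewrite | github.com/apandacoding/Projects | cats.py | feline_fixes
-- ===== SOURCE A (Python) =====
-- def feline_fixes(typed, source, limit):
--     """A diff function for autocorrect that determines how many letters
--     in TYPED need to be substituted to create SOURCE, then adds the difference in
--     their lengths and returns the result.
--
--     Arguments:
--         typed: a starting word
--         source: a string representing a desired goal word
--         limit: a number representing an upper bound on the number of chars that must change
--
--     >>> big_limit = 10
--     >>> feline_fixes("nice", "rice", big_limit)    # Substitute: n -> r
--     1
--     >>> feline_fixes("range", "rungs", big_limit)  # Substitute: a -> u, e -> s
--     2
--     >>> feline_fixes("pill", "pillage", big_limit) # Don't substitute anything, length difference of 3.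
--     3
--     >>> feline_fixes("roses", "arose", big_limit)  # Substitute: r -> a, o -> r, s -> o, e -> s, s -> e
--     5
--     >>> feline_fixes("rose", "hello", big_limit)   # Substitute: r->h, o->e, s->l, e->l, length difference of 1.
--     5
--     """
--     # BEGIN PROBLEM 6
--    # assert False, 'Remove this line'
--
--
--
--     if(typed == source):
--         return 0
--     elif (typed != source and limit >=0 and len(typed)> 0 and len(source) > 0):
--         if(typed[0] == source[0]):
--             return feline_fixes(typed[1:], source[1:], limit)
--         return 1 + feline_fixes(typed[1:], source[1:], limit-1)
--     else:
--         return abs(len(source) - len(typed))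
-- ===== SOURCE B (Python) =====
-- def feline_fixes(typed, source, limit):
--     """Iterative one-pass version: count mismatches over the paired prefix
--     while the budget lasts, then add the length difference."""
--     cost = 0
--     for a, b in zip(typed, source):
--         if limit < 0:
--             break
--         if a != b:
--             cost += 1
--             limit -= 1
--     return cost + abs(len(source) - len(typed))
-- ===== Notes on version B (the rewrite author's own statement) =====
-- stated objective: idiomatic
-- what changed: Replaced the slicing recursion by a single iterative pass over zip(typed, source) with a mismatch counter and a decrementing budget, adding the length difference once at the end.
import Mathlib
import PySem

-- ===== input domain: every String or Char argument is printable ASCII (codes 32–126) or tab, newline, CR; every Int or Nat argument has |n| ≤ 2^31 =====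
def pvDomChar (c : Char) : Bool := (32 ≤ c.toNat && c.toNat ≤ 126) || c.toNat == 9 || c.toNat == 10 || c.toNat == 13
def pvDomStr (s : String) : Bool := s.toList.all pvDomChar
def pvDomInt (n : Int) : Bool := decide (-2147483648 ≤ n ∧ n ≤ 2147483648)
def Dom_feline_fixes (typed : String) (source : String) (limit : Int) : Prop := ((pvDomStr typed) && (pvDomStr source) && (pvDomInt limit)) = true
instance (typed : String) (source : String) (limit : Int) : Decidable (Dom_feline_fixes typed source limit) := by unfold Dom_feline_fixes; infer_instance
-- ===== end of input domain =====

-- B replaces A's slicing recursion by a single iterative pass over the zipped prefix with a mismatch counter and budget (idiomatic/simpler; equal return value proved below).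


-- ===== PORT A =====
-- literal port of A's recursion (strings as char lists; slices typed[1:] -> tail)
def felineFixesRecA : List Char → List Char → Int → Int
  | t, s, limit =>
    if t = s then 0
    else if limit ≥ 0 ∧ t.length > 0 ∧ s.length > 0 then
      match t, s with
      | a :: t', b :: s' =>
        if a = b then felineFixesRecA t' s' limit
        else 1 + felineFixesRecA t' s' (limit - 1)
      | _, _ => 0  -- unreachable: both lists nonempty here
    else |((s.length : Int) - (t.length : Int))|
  termination_by t _ _ => t.length

def feline_fixes (typed : String) (source : String) (limit : Int) : Int :=
  felineFixesRecA typed.toList source.toList limit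

-- ===== PORT B =====
-- port of B's for-loop over zip(typed, source): tail recursion with (cost, limit) state
def felineFixesLoopB : List (Char × Char) → Int → Int → Int
  | [], cost, _ => cost
  | (a, b) :: rest, cost, limit =>
    if limit < 0 then cost
    else if a ≠ b then felineFixesLoopB rest (cost + 1) (limit - 1)
    else felineFixesLoopB rest cost limit

def feline_fixes_alt (typed : String) (source : String) (limit : Int) : Int :=
  felineFixesLoopB (typed.toList.zip source.toList) 0 limit
    + |((source.toList.length : Int) - (typed.toList.length : Int))|

-- ===== PRECONDITION & SPEC =====
def Spec_feline_fixes (typed : String) (source : String) (limit : Int) (out : Int) : Prop := out = feline_fixes_alt typed source limit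
instance (typed : String) (source : String) (limit : Int) (out : Int) : Decidable (Spec_feline_fixes typed source limit out) := by unfold Spec_feline_fixes; infer_instance

-- ===== CLAIM (what is proved, stated in full; the proofs are below) =====
def Claim_equal_feline_fixes : Prop := ∀ (typed : String) (source : String) (limit : Int), Dom_feline_fixes typed source limit → Spec_feline_fixes typed source limit (feline_fixes typed source limit)

-- ===== LEMMAS AND PROOFS =====

theorem loopB_acc (ps : List (Char × Char)) (cost limit : Int) :
    felineFixesLoopB ps cost limit = cost + felineFixesLoopB ps 0 limit := by
  induction ps generalizing cost limit with
  | nil => simp [felineFixesLoopB]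
  | cons p rest ih =>
    obtain ⟨a, b⟩ := p
    simp only [felineFixesLoopB]
    split_ifs with h1 h2
    · simp
    · rw [ih (cost + 1), ih (0 + 1)]; ring
    · exact ih cost limit

theorem loopB_zip_self (l : List Char) (lim : Int) :
    felineFixesLoopB (l.zip l) 0 lim = 0 := by
  induction l generalizing lim with
  | nil => simp [felineFixesLoopB]
  | cons c l' ihl =>
    simp only [List.zip_cons_cons, felineFixesLoopB]
    split_ifs with h1 <;> simp_all

theorem recA_cons (a b : Char) (t' s' : List Char) (limit : Int) :
    felineFixesRecA (a :: t') (b :: s') limit =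
      if a :: t' = b :: s' then 0
      else if limit ≥ 0 then
        (if a = b then felineFixesRecA t' s' limit
         else 1 + felineFixesRecA t' s' (limit - 1))
      else |(((b :: s').length : Int) - ((a :: t').length : Int))| := by
  rw [felineFixesRecA]
  by_cases heq : a :: t' = b :: s'
  · simp [heq]
  · rw [if_neg heq, if_neg heq]
    by_cases hlim : limit ≥ 0
    · rw [if_pos ⟨hlim, by simp, by simp⟩, if_pos hlim]
    · rw [if_neg (by intro h; exact hlim h.1), if_neg hlim]

theorem recA_eq_loopB (t s : List Char) (limit : Int) :
    felineFixesRecA t s limit =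
      felineFixesLoopB (t.zip s) 0 limit + |((s.length : Int) - (t.length : Int))| := by
  induction t generalizing s limit with
  | nil =>
    rw [felineFixesRecA]
    rcases s with _ | ⟨b, s'⟩
    · simp [felineFixesLoopB]
    · rw [if_neg (by simp), if_neg (by simp)]
      simp [felineFixesLoopB]
    all_goals rintro _ _ _ _ ⟨⟩
  | cons a t' ih =>
    rcases s with _ | ⟨b, s'⟩
    · rw [felineFixesRecA]
      rw [if_neg (by simp), if_neg (by simp)]
      simp [felineFixesLoopB]
      rintro _ _ _ _ _ ⟨⟩
    · rw [recA_cons]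
      by_cases heq : a :: t' = b :: s'
      · obtain ⟨rfl, rfl⟩ : a = b ∧ t' = s' := by
          injection heq with h1 h2; exact ⟨h1, h2⟩
        rw [if_pos rfl]
        rw [List.zip_cons_cons, felineFixesLoopB]
        split_ifs with h1 h2
        · simp
        · exact absurd rfl h2
        · simp [loopB_zip_self]
      · rw [if_neg heq]
        rw [List.zip_cons_cons]
        by_cases hlim : limit ≥ 0
        · rw [if_pos hlim]
          rw [show felineFixesLoopB ((a, b) :: t'.zip s') 0 limit =
                if limit < 0 then 0
                else if a ≠ b then felineFixesLoopB (t'.zip s') (0 + 1) (limit - 1)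
                else felineFixesLoopB (t'.zip s') 0 limit from rfl]
          rw [if_neg (by omega : ¬ limit < 0)]
          by_cases hab : a = b
          · rw [if_pos hab, if_neg (by simpa using hab)]
            rw [ih s' limit]; simp
          · rw [if_neg hab, if_pos (by simpa using hab)]
            rw [loopB_acc _ (0 + 1) (limit - 1), ih s' (limit - 1)]
            simp only [List.length_cons]
            push_cast
            ring_nf
        · rw [if_neg hlim]
          rw [show felineFixesLoopB ((a, b) :: t'.zip s') 0 limit =
                if limit < 0 then 0
                else if a ≠ b then felineFixesLoopB (t'.zip s') (0 + 1) (limit - 1)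
                else felineFixesLoopB (t'.zip s') 0 limit from rfl]
          rw [if_pos (by omega : limit < 0)]
          simp

-- ===== VERDICT (by name: the statement is the Claim_ definition above) =====
theorem feline_fixes_spec : Claim_equal_feline_fixes := by
  intro typed source limit _
  unfold Spec_feline_fixes feline_fixes feline_fixes_alt
  exact recA_eq_loopB typed.toList source.toList limit
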